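-- pv_equiv track=rewrite | github.com/StarryCod/Void-engine | scripts/ts_unused_commenter.py | comment_import_block
-- ===== SOURCE A (Python) =====
-- from typing import Dict, Iterable, List, Optional, Tuple
--
-- def comment_import_block(lines: List[str], start_index: int) -> bool:
--     if start_index < 0 or start_index >= len(lines):
--         return False
--     if "import" not in lines[start_index]:
--         return False
--
--     changed = False
--     idx = start_index
--     max_index = len(lines) - 1
--     while idx <= max_index:
--         stripped = lines[idx].lstrip()
--         if stripped and not stripped.startswith("//"):
--             lines[idx] = f"// UNUSED-AUTO: {lines[idx]}"
--             changed = True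
--         if ";" in lines[idx]:
--             break
--         idx += 1
--     return changed
-- ===== SOURCE B (Python) =====
-- def comment_import_block(lines, start_index):
--     if start_index < 0 or start_index >= len(lines):
--         return False
--     if "import" not in lines[start_index]:
--         return False
--     # Pass 1: find the block boundary on the ORIGINAL lines (the comment
--     # prefix adds no ';', so this is the same boundary A's fused loop hits).
--     end = len(lines) - 1
--     for i in range(start_index, len(lines)):
--         if ";" in lines[i]:
--             end = i
--             break
--     # Pass 2: comment the block.
--     changed = False
--     for i in range(start_index, end + 1):
--         s = lines[i].lstrip()
--         if s and not s.startswith("//"):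
--             lines[i] = "// UNUSED-AUTO: " + lines[i]
--             changed = True
--     return changed
-- ===== Notes on version B (the rewrite author's own statement) =====
-- stated objective: alternative
-- what changed: A's single fused while-loop (comment each line, then test it for ';' and break) is split into two passes: first a boundary scan finding the first ';' line, then a plain marking loop over the fixed range [start_index, end], relying on the fact that the added prefix contains no ';'.
import Mathlib
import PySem

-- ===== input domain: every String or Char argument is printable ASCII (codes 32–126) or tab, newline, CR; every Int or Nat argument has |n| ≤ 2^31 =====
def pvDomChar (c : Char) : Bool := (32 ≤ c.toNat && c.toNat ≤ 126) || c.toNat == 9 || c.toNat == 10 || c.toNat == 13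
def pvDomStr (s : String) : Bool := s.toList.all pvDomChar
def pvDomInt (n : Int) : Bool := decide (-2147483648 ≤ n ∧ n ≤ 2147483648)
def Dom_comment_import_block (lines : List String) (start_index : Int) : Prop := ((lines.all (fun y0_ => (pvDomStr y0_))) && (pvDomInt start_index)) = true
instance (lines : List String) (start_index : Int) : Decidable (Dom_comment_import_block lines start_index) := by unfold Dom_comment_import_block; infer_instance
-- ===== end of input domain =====

-- B splits A's fused comment-and-break loop into a boundary scan plus a marking pass over a
-- fixed range (same cost). Both Pythons mutate `lines` identically; the theorem is about the
-- returned Bool. String concatenation "// UNUSED-AUTO: " + line is ported by hand as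
-- String.ofList (toList ++ toList), which is exact for Python `+` on str.

-- ===== PORT A =====
-- the while loop: state = (current list, idx, changed); line2 is lines[idx] after the optional assignment
def commentLoopA (ls : List String) (idx : Nat) (changed : Bool) : Bool :=
  if h : idx < ls.length then
    let line := ls[idx]
    let stripped := PySem.Str.lstrip line
    let hit := PySem.Str.len stripped != 0 && !PySem.Str.startswith stripped "//"
    let line2 := if hit then String.ofList ("// UNUSED-AUTO: ".toList ++ line.toList) else line
    let ls2 := if hit then ls.set idx line2 else ls
    let changed2 := changed || hit
    if PySem.Str.isIn ";" line2 then changed2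
    else commentLoopA ls2 (idx + 1) changed2
  else changed
termination_by ls.length - idx
decreasing_by
  split
  · simp only [List.length_set]; omega
  · omega

def comment_import_block (lines : List String) (start_index : Int) : Bool :=
  if start_index < 0 || PySem.List.len lines ≤ start_index then false
  else if !PySem.Str.isIn "import" (PySem.List.pyGetD lines start_index "") then false
  else commentLoopA lines start_index.toNat false

-- ===== PORT B =====
-- pass 1 of Source B: first index ≥ i whose line contains ';', else len-1
def findEndB (ls : List String) (i : Nat) : Nat :=
  if h : i < ls.length then
    if PySem.Str.isIn ";" ls[i] then i else findEndB ls (i + 1)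
  else ls.length - 1
termination_by ls.length - i

-- pass 2 of Source B: for i in range(i, stop+1), comment the line, accumulate changed
def commentMarkB (ls : List String) (i : Nat) (stop : Nat) (changed : Bool) : Bool :=
  if i ≤ stop then
    let line := PySem.List.pyGetD ls (i : Int) ""
    let s := PySem.Str.lstrip line
    let hit := PySem.Str.len s != 0 && !PySem.Str.startswith s "//"
    let ls2 := if hit then ls.set i (String.ofList ("// UNUSED-AUTO: ".toList ++ line.toList)) else ls
    commentMarkB ls2 (i + 1) stop (changed || hit)
  else changed
termination_by stop + 1 - i

def comment_import_block_alt (lines : List String) (start_index : Int) : Bool :=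
  if start_index < 0 || PySem.List.len lines ≤ start_index then false
  else if !PySem.Str.isIn "import" (PySem.List.pyGetD lines start_index "") then false
  else commentMarkB lines start_index.toNat (findEndB lines start_index.toNat) false

-- ===== PRECONDITION & SPEC =====
def Spec_comment_import_block (lines : List String) (start_index : Int) (out : Bool) : Prop := out = comment_import_block_alt lines start_index
instance (lines : List String) (start_index : Int) (out : Bool) : Decidable (Spec_comment_import_block lines start_index out) := by unfold Spec_comment_import_block; infer_instance

-- ===== CLAIM (what is proved, stated in full; the proofs are below) =====
def Claim_equal_comment_import_block : Prop := ∀ (lines : List String) (start_index : Int), Dom_comment_import_block lines start_index → Spec_comment_import_block lines start_index (comment_import_block lines start_index)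

-- ===== LEMMAS AND PROOFS =====

-- the per-line predicate: non-blank and not already a // comment
def lineHit (line : String) : Bool :=
  PySem.Str.len (PySem.Str.lstrip line) != 0 && !PySem.Str.startswith (PySem.Str.lstrip line) "//"

-- reference scan: OR of lineHit up to and including the first ';' line
def pureScan : List String → Bool
  | [] => false
  | l :: rest => if PySem.Str.isIn ";" l then lineHit l else lineHit l || pureScan rest

-- OR of lineHit over indices i..stop of a fixed list
def anyIdx (ls : List String) (i : Nat) (stop : Nat) : Bool :=
  if i ≤ stop then lineHit (PySem.List.pyGetD ls (i : Int) "") || anyIdx ls (i + 1) stop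
  else false
termination_by stop + 1 - i

-- the comment prefix contains no ';', so the break test sees the original line
theorem isIn_semi_prefixed (line : String) :
    PySem.Str.isIn ";" (String.ofList ("// UNUSED-AUTO: ".toList ++ line.toList)) = PySem.Str.isIn ";" line := by
  apply Bool.coe_iff_coe.mp
  rw [PySem.Str.isIn_iff_infix, PySem.Str.isIn_iff_infix]
  simp only [String.toList_ofList]
  rw [show (";".toList : List Char) = [';'] from rfl, List.singleton_infix_iff,
    List.singleton_infix_iff, List.mem_append]
  refine ⟨fun h => ?_, Or.inr⟩
  rcases h with h | h
  · exact absurd h (by decide)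
  · exact h

-- A's fused loop computes the reference scan of the untouched suffix
theorem commentLoopA_eq (ls : List String) (idx : Nat) (changed : Bool) :
    commentLoopA ls idx changed = (changed || pureScan (ls.drop idx)) := by
  fun_induction commentLoopA ls idx changed with
  | case1 ls idx changed h line stripped hit line2 changed2 hsemi =>
    have hline2 : line2 = if hit = true then String.ofList ("// UNUSED-AUTO: ".toList ++ line.toList) else line := rfl
    have hs : PySem.Str.isIn ";" line = true := by
      rw [hline2] at hsemi
      rcases hh : hit with _ | _
      · rwa [hh, if_neg (by simp)] at hsemi
      · rw [hh, if_pos rfl, isIn_semi_prefixed] at hsemi; exact hsemi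
    rw [← List.getElem_cons_drop h, pureScan, hs, if_pos rfl]
    rfl
  | case2 ls idx changed h line stripped hit line2 ls2 changed2 hsemi ih =>
    have hline2 : line2 = if hit = true then String.ofList ("// UNUSED-AUTO: ".toList ++ line.toList) else line := rfl
    have hs : PySem.Str.isIn ";" line = false := by
      rw [Bool.not_eq_true] at hsemi
      rw [hline2] at hsemi
      rcases hh : hit with _ | _
      · rwa [hh, if_neg (by simp)] at hsemi
      · rw [hh, if_pos rfl, isIn_semi_prefixed] at hsemi; exact hsemi
    have hdrop2 : ls2.drop (idx + 1) = ls.drop (idx + 1) := by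
      have hls2 : ls2 = if hit = true then ls.set idx line2 else ls := rfl
      rcases hh : hit with _ | _
      · rw [hls2, hh, if_neg (by simp)]
      · rw [hls2, hh, if_pos rfl, List.drop_set_of_lt (by omega)]
    rw [ih, hdrop2, ← List.getElem_cons_drop h, pureScan, hs]
    have hc2 : changed2 = (changed || hit) := rfl
    rw [hc2, Bool.or_assoc, if_neg (by simp)]
    rfl
  | case3 ls idx changed h =>
    rw [List.drop_of_length_le (by omega), pureScan, Bool.or_false]

theorem pyGetD_set_ne (ls : List String) (k i : Nat) (a : String) (h : k ≠ i) :
    PySem.List.pyGetD (ls.set k a) (i : Int) "" = PySem.List.pyGetD ls (i : Int) "" := by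
  rw [PySem.List.pyGetD_natCast, PySem.List.pyGetD_natCast, List.getD_eq_getElem?_getD,
    List.getD_eq_getElem?_getD, List.getElem?_set_ne h]

-- marking a line at an earlier index never changes the scan of later indices
theorem anyIdx_set (ls : List String) (k : Nat) (a : String) (i stop : Nat) (hk : k < i) :
    anyIdx (ls.set k a) i stop = anyIdx ls i stop := by
  fun_induction anyIdx ls i stop with
  | case1 i h ih =>
    rw [anyIdx, if_pos h, ih (by omega), pyGetD_set_ne _ _ _ _ (by omega)]
  | case2 i h => rw [anyIdx, if_neg h]

-- B's marking pass computes the index scan of the original list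
theorem commentMarkB_eq (ls : List String) (i stop : Nat) (changed : Bool) :
    commentMarkB ls i stop changed = (changed || anyIdx ls i stop) := by
  induction hn : stop + 1 - i generalizing ls i changed with
  | zero =>
    rw [commentMarkB, if_neg (by omega), anyIdx, if_neg (by omega), Bool.or_false]
  | succ n ihn =>
    have h : i ≤ stop := by omega
    rw [commentMarkB, if_pos h]
    simp only []
    rw [ihn _ _ _ (by omega)]
    have ha : ∀ b : List String, b = (if (PySem.Str.len (PySem.Str.lstrip (PySem.List.pyGetD ls (i : Int) "")) != 0 &&
        !PySem.Str.startswith (PySem.Str.lstrip (PySem.List.pyGetD ls (i : Int) "")) "//") then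
        ls.set i (String.ofList ("// UNUSED-AUTO: ".toList ++ (PySem.List.pyGetD ls (i : Int) "").toList)) else ls) →
        anyIdx b (i + 1) stop = anyIdx ls (i + 1) stop := by
      intro b hb
      by_cases hh : (PySem.Str.len (PySem.Str.lstrip (PySem.List.pyGetD ls (i : Int) "")) != 0 &&
        !PySem.Str.startswith (PySem.Str.lstrip (PySem.List.pyGetD ls (i : Int) "")) "//") = true
      · rw [hb, if_pos hh, anyIdx_set _ _ _ _ _ (by omega)]
      · rw [hb, if_neg hh]
    rw [ha _ rfl]
    conv_rhs => rw [anyIdx]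
    rw [if_pos h, ← Bool.or_assoc]
    rfl

theorem findEndB_ge (ls : List String) (i : Nat) : i < ls.length → i ≤ findEndB ls i := by
  fun_induction findEndB ls i with
  | case1 i h hsemi => intro; omega
  | case2 i h hsemi ih =>
    intro
    by_cases hl : i + 1 < ls.length
    · have := ih hl; omega
    · rw [findEndB, dif_neg hl]; omega
  | case3 i h => intro; omega

-- the two decompositions agree: scanning to the first ';' line equals scanning indices up to findEndB
theorem pureScan_eq_anyIdx (ls : List String) (i : Nat) (h : i < ls.length) :
    pureScan (ls.drop i) = anyIdx ls i (findEndB ls i) := by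
  induction hn : ls.length - i generalizing i with
  | zero => omega
  | succ n ih =>
    have hget : PySem.List.pyGetD ls (i : Int) "" = ls[i] := by
      rw [PySem.List.pyGetD_natCast, List.getD_eq_getElem?_getD, List.getElem?_eq_getElem h]
      rfl
    rw [← List.getElem_cons_drop h, pureScan, findEndB, dif_pos h]
    by_cases hs : PySem.Str.isIn ";" ls[i] = true
    · rw [if_pos hs, if_pos hs, anyIdx, if_pos (le_refl i), hget]
      rw [anyIdx, if_neg (by omega), Bool.or_false]
    · rw [if_neg hs, if_neg hs]
      by_cases hl : i + 1 < ls.length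
      · have hge : i + 1 ≤ findEndB ls (i + 1) := findEndB_ge ls (i + 1) hl
        rw [anyIdx, if_pos (by omega), hget, ih (i + 1) hl (by omega)]
      · have hE : findEndB ls (i + 1) = i := by rw [findEndB, dif_neg hl]; omega
        rw [hE, anyIdx, if_pos (le_refl i), hget, anyIdx, if_neg (by omega),
          List.drop_of_length_le (by omega), pureScan]

-- ===== VERDICT (by name: the statement is the Claim_ definition above) =====
theorem comment_import_block_spec : Claim_equal_comment_import_block := by
  intro lines start_index _
  unfold Spec_comment_import_block comment_import_block comment_import_block_alt
  split
  · rfl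
  · split
    · rfl
    · rename_i hguard _
      have hlt : start_index.toNat < lines.length := by
        simp [PySem.List.len] at hguard; omega
      rw [commentLoopA_eq, commentMarkB_eq, Bool.false_or, Bool.false_or,
        pureScan_eq_anyIdx lines start_index.toNat hlt]
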